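-- pv_equiv track=rewrite | github.com/00Nasimnouri00/SpeakTrek | main3.py | match_emotion_pitches
-- ===== SOURCE A (Python) =====
-- def match_emotion_pitches(phrase_list, pitch_values):
--     matched_pitches = {}
--     current_index = 0
--
--     for phrase in phrase_list:
--         words = phrase.split()
--         phrase_length = len(words)
--
--         if current_index + phrase_length <= len(pitch_values):
--             matched_pitches[phrase] = pitch_values[current_index:current_index + phrase_length]
--             current_index += phrase_length
--         else:
--             break
--
--     return matched_pitches
-- ===== SOURCE B (Python) =====
-- def match_emotion_pitches(phrase_list, pitch_values):
--     # pass 1: cumulative end-offsets per phrase (word counts accumulated)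
--     ends = []
--     total = 0
--     for p in phrase_list:
--         total += len(p.split())
--         ends.append(total)
--     L = len(pitch_values)
--     # ends is nondecreasing, so the first overflow index is the count of ends <= L
--     k = sum(1 for e in ends if e <= L)
--     # pass 2: build the dict from (phrase, start, end) boundary triples
--     return {p: pitch_values[s:e]
--             for p, s, e in zip(phrase_list[:k], [0] + ends[:-1], ends)}
-- ===== Notes on version B (the rewrite author's own statement) =====
-- stated objective: alternative
-- what changed: Replaces the single index-mutating loop with break by two passes: first compute cumulative word-count end-offsets, count how many fit (the break point, found arithmetically since offsets are nondecreasing), then build the dict in one comprehension over (phrase, start, end) triples.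
import Mathlib
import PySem

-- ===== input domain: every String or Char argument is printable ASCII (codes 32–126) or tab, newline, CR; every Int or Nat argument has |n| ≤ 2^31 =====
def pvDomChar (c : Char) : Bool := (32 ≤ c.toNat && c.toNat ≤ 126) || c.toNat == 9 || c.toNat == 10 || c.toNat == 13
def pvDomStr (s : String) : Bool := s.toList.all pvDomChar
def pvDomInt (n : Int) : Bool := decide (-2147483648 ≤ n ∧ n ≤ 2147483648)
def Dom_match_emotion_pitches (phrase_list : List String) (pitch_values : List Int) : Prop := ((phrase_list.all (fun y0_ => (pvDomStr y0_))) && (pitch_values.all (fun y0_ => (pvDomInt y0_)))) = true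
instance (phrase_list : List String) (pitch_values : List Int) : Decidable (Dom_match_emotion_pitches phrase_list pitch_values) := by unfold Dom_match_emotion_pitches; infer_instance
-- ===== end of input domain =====

-- B computes the phrase boundary offsets in a separate cumulative pass and then builds the
-- dict from (phrase, start, end) triples, instead of A's single index-mutating loop with break.

-- ===== PORT A =====
-- A's loop: mutable dict + current_index, break when the slice would overflow.
def matchGoA (pv : List Int) : List String → PySem.Dict String (List Int) → Int → PySem.Dict String (List Int)
  | [], d, _ => d
  | p :: rest, d, ci =>
    let n : Int := (PySem.Str.split₀ p).length
    if ci + n ≤ (pv.length : Int) then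
      matchGoA pv rest (d.insert p (PySem.List.slice pv (some ci) (some (ci + n)))) (ci + n)
    else d

def match_emotion_pitches (phrase_list : List String) (pitch_values : List Int) : List (String × List Int) :=
  (matchGoA pitch_values phrase_list PySem.Dict.empty 0).items

-- ===== PORT B =====
-- pass 1 of Source B: cumulative word-count end-offsets
def matchEnds (t : Int) : List String → List Int
  | [] => []
  | p :: rest =>
    let t' := t + (PySem.Str.split₀ p).length
    t' :: matchEnds t' rest

def match_emotion_pitches_alt (phrase_list : List String) (pitch_values : List Int) : List (String × List Int) :=
  let ends := matchEnds 0 phrase_list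
  let L : Int := pitch_values.length
  let k := ends.countP (fun e => e ≤ L)
  let triples := List.zipWith3 (fun p s e => (p, s, e)) (phrase_list.take k) (0 :: ends.dropLast) ends
  (triples.foldl (fun d t => d.insert t.1 (PySem.List.slice pitch_values (some t.2.1) (some t.2.2))) PySem.Dict.empty).items

-- ===== PRECONDITION & SPEC =====
def Spec_match_emotion_pitches (phrase_list : List String) (pitch_values : List Int) (out : List (String × List Int)) : Prop := out = match_emotion_pitches_alt phrase_list pitch_values
instance (phrase_list : List String) (pitch_values : List Int) (out : List (String × List Int)) : Decidable (Spec_match_emotion_pitches phrase_list pitch_values out) := by unfold Spec_match_emotion_pitches; infer_instance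

-- ===== CLAIM (what is proved, stated in full; the proofs are below) =====
def Claim_equal_match_emotion_pitches : Prop := ∀ (phrase_list : List String) (pitch_values : List Int), Dom_match_emotion_pitches phrase_list pitch_values → Spec_match_emotion_pitches phrase_list pitch_values (match_emotion_pitches phrase_list pitch_values)

-- ===== LEMMAS AND PROOFS =====

-- every end-offset starting from t is at least t (word counts are nonnegative)
theorem le_matchEnds (pl : List String) : ∀ (t : Int) (e : Int), e ∈ matchEnds t pl → t ≤ e := by
  induction pl with
  | nil => intro t e h; simp [matchEnds] at h
  | cons p rest ih =>
    intro t e h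
    simp only [matchEnds, List.mem_cons] at h
    have hn : (0 : Int) ≤ (PySem.Str.split₀ p).length := Int.natCast_nonneg _
    rcases h with h | h
    · omega
    · have := ih _ _ h; omega

theorem matchGoA_eq (pv : List Int) (pl : List String) :
    ∀ (d : PySem.Dict String (List Int)) (ci : Int),
    matchGoA pv pl d ci =
      (List.zipWith3 (fun p s e => (p, s, e))
          (pl.take ((matchEnds ci pl).countP (fun e => e ≤ (pv.length : Int))))
          (ci :: (matchEnds ci pl).dropLast) (matchEnds ci pl)).foldl
        (fun d t => d.insert t.1 (PySem.List.slice pv (some t.2.1) (some t.2.2))) d := by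
  induction pl with
  | nil => intro d ci; simp [matchGoA, matchEnds, List.zipWith3]
  | cons p rest ih =>
    intro d ci
    simp only [matchGoA, matchEnds]
    set n : Int := ((PySem.Str.split₀ p).length : Int) with hn
    by_cases h : ci + n ≤ (pv.length : Int)
    · rw [if_pos h]
      have hcount : ((ci + n) :: matchEnds (ci + n) rest).countP (fun e => e ≤ (pv.length : Int))
          = (matchEnds (ci + n) rest).countP (fun e => e ≤ (pv.length : Int)) + 1 := by
        simp [List.countP_cons, h]
      rw [hcount]
      cases rest with
      | nil => simp [matchGoA, matchEnds, List.zipWith3]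
      | cons r rs =>
        have htail : matchEnds (ci + n) (r :: rs) =
            (ci + n + (PySem.Str.split₀ r).length) :: matchEnds (ci + n + (PySem.Str.split₀ r).length) rs := rfl
        rw [ih (d.insert p (PySem.List.slice pv (some ci) (some (ci + n)))) (ci + n)]
        rw [htail]
        simp [List.zipWith3, List.take_succ_cons, List.foldl_cons]
    · rw [if_neg h]
      have hall : (matchEnds (ci + n) rest).countP (fun e => e ≤ (pv.length : Int)) = 0 := by
        rw [List.countP_eq_zero]
        intro e he
        have := le_matchEnds rest (ci + n) e he
        simp only [decide_eq_true_eq]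
        omega
      have hcount : ((ci + n) :: matchEnds (ci + n) rest).countP (fun e => e ≤ (pv.length : Int)) = 0 := by
        simp [List.countP_cons, hall, h]
      rw [hcount]
      simp [List.zipWith3]

-- ===== VERDICT (by name: the statement is the Claim_ definition above) =====
theorem match_emotion_pitches_spec : Claim_equal_match_emotion_pitches := by
  intro pl pv _
  unfold Spec_match_emotion_pitches match_emotion_pitches match_emotion_pitches_alt
  rw [matchGoA_eq]
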